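-- pv_equiv track=rewrite | github.com/tofulim/algorithm_study | algorithm/programers/mine_digging.py | dig_mine
-- ===== SOURCE A (Python) =====
-- pick2cost = {
--     0: {"diamond": 1, "iron": 1, "stone": 1},
--     1: {"diamond": 5, "iron": 1, "stone": 1},
--     2: {"diamond": 25, "iron": 5, "stone": 1},
-- }
--
-- def dig_mine(part2pick: dict, minerals: list):
--     cost = 0
--     mineral_idx = 0
--     max_mineral_idx = len(minerals)
--     for part_idx, pick in part2pick.items():
--         # 곡괭이를 다 쓴 part일 경우 다음 곡괭이로 넘어간다
--         if pick == -1: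
--             return cost
--         # 곡괭이를 다 소모한다
--         for i in range(5):
--             mineral_idx = part_idx * 5 + i
--             # 광물을 다 캔 경우 곡괭이를 채광를 종료한다
--             if mineral_idx >= max_mineral_idx:
--                 break
--
--             mineral = minerals[mineral_idx]
--             current_cost = pick2cost[pick][mineral]
--             cost += current_cost
--
--     return cost
-- ===== SOURCE B (Python) =====
-- pick2cost = {
--     0: {"diamond": 1, "iron": 1, "stone": 1},
--     1: {"diamond": 5, "iron": 1, "stone": 1},
--     2: {"diamond": 25, "iron": 5, "stone": 1},
-- }
--
-- def dig_mine(part2pick: dict, minerals: list):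
--     # stage 1: keep the picks up to (excluding) the first worn-out (-1) one
--     pickmap = {}
--     for part_idx, pick in part2pick.items():
--         if pick == -1:
--             break
--         pickmap[part_idx] = pick
--     # stage 2: one pass over the minerals; mineral i belongs to part i // 5
--     return sum(pick2cost[pickmap[i // 5]][m]
--                for i, m in enumerate(minerals) if i // 5 in pickmap)
-- ===== Notes on version B (the rewrite author's own statement) =====
-- stated objective: alternative
-- what changed: B inverts the traversal: it first builds a part->pick map (stopping at the first -1 pick), then makes a single pass over the minerals, charging each mineral by the pick found at key index//5 - the inner range(5) loop and all per-part indexing disappear.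
-- intended difference: On inputs where some part before the first -1 pick has a negative part index with part_idx*5 >= -len(minerals), A wraps around via Python negative indexing and charges minerals from the end of the list for that part, while B charges nothing for it, which is intended since part indices number the 5-element chunks and a negative index addresses no chunk. — e.g. on dig_mine([(-1, 0)], ["stone", "stone", "stone", "stone", "stone"]): A returns 5, B returns 0
import Mathlib
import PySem

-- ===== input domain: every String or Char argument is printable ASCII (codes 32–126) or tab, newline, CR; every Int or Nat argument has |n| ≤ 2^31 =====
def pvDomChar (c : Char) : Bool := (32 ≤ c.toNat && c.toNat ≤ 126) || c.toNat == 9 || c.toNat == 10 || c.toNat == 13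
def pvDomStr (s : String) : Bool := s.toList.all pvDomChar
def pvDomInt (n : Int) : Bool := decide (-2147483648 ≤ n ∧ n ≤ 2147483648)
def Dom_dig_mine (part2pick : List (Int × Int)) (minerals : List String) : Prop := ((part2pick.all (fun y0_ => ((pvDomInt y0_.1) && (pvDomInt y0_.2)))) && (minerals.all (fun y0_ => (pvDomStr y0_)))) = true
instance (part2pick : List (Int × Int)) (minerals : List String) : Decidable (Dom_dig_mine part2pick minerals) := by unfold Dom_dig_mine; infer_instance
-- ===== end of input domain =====

-- B inverts the traversal: it first builds a part→pick map (stopping at the first -1), then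
-- makes ONE pass over the minerals, charging mineral i by the pick found at key i // 5 — no
-- inner range(5) loop and no per-part indexing (objective: alternative; B treats a negative
-- part index as addressing no chunk, the intended difference stated at D_ below).

-- ===== PORT A =====
-- the module constant pick2cost, a dict of dicts
def pick2costA : PySem.Dict Int (PySem.Dict String Int) :=
  PySem.Dict.ofList
    [(0, PySem.Dict.ofList [("diamond", 1), ("iron", 1), ("stone", 1)]),
     (1, PySem.Dict.ofList [("diamond", 5), ("iron", 1), ("stone", 1)]),
     (2, PySem.Dict.ofList [("diamond", 25), ("iron", 5), ("stone", 1)])]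

-- inner 'for i in range(5): mineral_idx = part_idx*5+i; if mineral_idx >= max: break; …'
-- (fuel counts the remaining of the 5 iterations; idx is part_idx*5+i).
-- minerals[mineral_idx] is PySem.List.pyGetD; where Python would raise (IndexError/KeyError,
-- excluded by Pre_) the lookups fall back to ""/empty/0.
def digInnerA (minerals : List String) (maxIdx pick : Int) : Nat → Int → Int → Int
  | 0, _, cost => cost
  | fuel + 1, idx, cost =>
      if idx ≥ maxIdx then cost
      else
        let mineral := PySem.List.pyGetD minerals idx ""
        let currentCost := ((pick2costA.get? pick).getD PySem.Dict.empty).getD mineral 0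
        digInnerA minerals maxIdx pick fuel (idx + 1) (cost + currentCost)

-- outer 'for part_idx, pick in part2pick.items(): if pick == -1: return cost; …'
def digOuterA (minerals : List String) (maxIdx : Int) : List (Int × Int) → Int → Int
  | [], cost => cost
  | (partIdx, pick) :: rest, cost =>
      if pick = -1 then cost
      else digOuterA minerals maxIdx rest (digInnerA minerals maxIdx pick 5 (partIdx * 5) cost)

def dig_mine (part2pick : List (Int × Int)) (minerals : List String) : Int :=
  digOuterA minerals (minerals.length : Int) part2pick 0

-- ===== PORT B =====
-- the module constant pick2cost of Source B (same table)
def pick2costB : PySem.Dict Int (PySem.Dict String Int) :=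
  PySem.Dict.ofList
    [(0, PySem.Dict.ofList [("diamond", 1), ("iron", 1), ("stone", 1)]),
     (1, PySem.Dict.ofList [("diamond", 5), ("iron", 1), ("stone", 1)]),
     (2, PySem.Dict.ofList [("diamond", 25), ("iron", 5), ("stone", 1)])]

-- stage 1: 'pickmap = {}; for part_idx, pick in part2pick.items(): if pick == -1: break; pickmap[part_idx] = pick'
def pmOfB : List (Int × Int) → PySem.Dict Int Int → PySem.Dict Int Int
  | [], d => d
  | (partIdx, pick) :: rest, d =>
      if pick = -1 then d else pmOfB rest (d.insert partIdx pick)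

-- one term of the generator: 'pick2cost[pickmap[i // 5]][m] … if i // 5 in pickmap' (0 otherwise)
def elemCostB (pm : PySem.Dict Int Int) (i : Int) (m : String) : Int :=
  match pm.get? (PySem.Int.floordiv i 5) with
  | some pick => ((pick2costB.get? pick).getD PySem.Dict.empty).getD m 0
  | none => 0

-- stage 2: 'sum(… for i, m in enumerate(minerals) …)'
def dig_mine_alt (part2pick : List (Int × Int)) (minerals : List String) : Int :=
  let pm := pmOfB part2pick PySem.Dict.empty
  (PySem.List.enumerate minerals 0).foldl (fun total im => total + elemCostB pm im.1 im.2) 0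

-- ===== PRECONDITION & SPEC =====
-- Pre_ excludes (a) association lists with duplicate part indices, which no Python dict argument can
-- represent (duplicates collapse in the dict, so both Pythons see one entry while both ports see two),
-- and (b) inputs on which A raises: KeyError when a processed pick is outside {0,1,2} or an accessed
-- mineral is not diamond/iron/stone, IndexError when an accessed index is below -len(minerals).
def Pre_dig_mine (part2pick : List (Int × Int)) (minerals : List String) : Prop :=
  (part2pick.map Prod.fst).Nodup ∧
  ∀ pk ∈ part2pick.takeWhile (fun pk => pk.2 ≠ -1),
    (minerals.length : Int) ≤ pk.1 * 5 ∨
    (-(minerals.length : Int) ≤ pk.1 * 5 ∧ (pk.2 = 0 ∨ pk.2 = 1 ∨ pk.2 = 2) ∧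
      ∀ i ∈ List.range 5, pk.1 * 5 + (i : Int) < (minerals.length : Int) →
        PySem.List.pyGetD minerals (pk.1 * 5 + (i : Int)) ""
          ∈ (["diamond", "iron", "stone"] : List String))
instance (part2pick : List (Int × Int)) (minerals : List String) : Decidable (Pre_dig_mine part2pick minerals) := by unfold Pre_dig_mine; infer_instance

def pvWitness_dig_mine : (List (Int × Int)) × List String :=
  ([(0, 1), (1, -1)], ["diamond", "stone", "iron", "stone", "stone", "iron"])

-- On inputs where some part before the first -1 pick has a negative part index with
-- part_idx*5 ≥ -len(minerals), A wraps around via Python's negative indexing and charges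
-- minerals from the END of the list for that part, while B charges nothing for it — the
-- intended reading, since part indices number the 5-element chunks and a negative part
-- index addresses no chunk.
def D_dig_mine (part2pick : List (Int × Int)) (minerals : List String) : Prop :=
  ∃ pk ∈ part2pick.takeWhile (fun pk => pk.2 ≠ -1),
    pk.1 < 0 ∧ -(minerals.length : Int) ≤ pk.1 * 5
instance (part2pick : List (Int × Int)) (minerals : List String) : Decidable (D_dig_mine part2pick minerals) := by unfold D_dig_mine; infer_instance

def Spec_dig_mine (part2pick : List (Int × Int)) (minerals : List String) (out : Int) : Prop := ¬ D_dig_mine part2pick minerals → out = dig_mine_alt part2pick minerals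
instance (part2pick : List (Int × Int)) (minerals : List String) (out : Int) : Decidable (Spec_dig_mine part2pick minerals out) := by unfold Spec_dig_mine; infer_instance

def pvDiffWitness_dig_mine : (List (Int × Int)) × List String :=
  ([(-1, 0)], ["stone", "stone", "stone", "stone", "stone"])
def pvDiffWitnessOut_dig_mine : Int × Int := (5, 0)

-- ===== CLAIM (what is proved, stated in full; the proofs are below) =====
def Claim_unchanged_dig_mine : Prop := ∀ (part2pick : List (Int × Int)) (minerals : List String), Dom_dig_mine part2pick minerals → Pre_dig_mine part2pick minerals → Spec_dig_mine part2pick minerals (dig_mine part2pick minerals)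
def Claim_changed_dig_mine : Prop := Dom_dig_mine (pvDiffWitness_dig_mine.1) (pvDiffWitness_dig_mine.2) ∧ Pre_dig_mine (pvDiffWitness_dig_mine.1) (pvDiffWitness_dig_mine.2) ∧ D_dig_mine (pvDiffWitness_dig_mine.1) (pvDiffWitness_dig_mine.2) ∧ dig_mine (pvDiffWitness_dig_mine.1) (pvDiffWitness_dig_mine.2) = pvDiffWitnessOut_dig_mine.1 ∧ dig_mine_alt (pvDiffWitness_dig_mine.1) (pvDiffWitness_dig_mine.2) = pvDiffWitnessOut_dig_mine.2 ∧ pvDiffWitnessOut_dig_mine.1 ≠ pvDiffWitnessOut_dig_mine.2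
def Claim_exact_dig_mine : Prop := ∀ (part2pick : List (Int × Int)) (minerals : List String), Dom_dig_mine part2pick minerals → Pre_dig_mine part2pick minerals → D_dig_mine part2pick minerals → dig_mine part2pick minerals ≠ dig_mine_alt part2pick minerals

-- ===== LEMMAS AND PROOFS =====

-- proof-side abbreviations
def costA (p : Int) (m : String) : Int :=
  ((pick2costA.get? p).getD PySem.Dict.empty).getD m 0

def chunkA (minerals : List String) (k p : Int) : Int :=
  ((PySem.List.pyRange (k * 5) (min (k * 5 + 5) (minerals.length : Int)) 1).map
    (fun j => costA p (PySem.List.pyGetD minerals j ""))).sum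

def SB (minerals : List String) (pm : PySem.Dict Int Int) : Int :=
  ((PySem.List.enumerate minerals).map (fun im => elemCostB pm im.1 im.2)).sum

def negSum (minerals : List String) (l : List (Int × Int)) : Int :=
  (((l.takeWhile (fun pk => pk.2 ≠ -1)).filter (fun pk => pk.1 < 0)).map
    (fun pk => chunkA minerals pk.1 pk.2)).sum

lemma tables_eq : pick2costB = pick2costA := rfl

lemma dict_getD_nonneg (d : PySem.Dict String Int) (m : String)
    (h : ∀ pr ∈ d.items, 0 ≤ pr.2) : 0 ≤ d.getD m 0 := by
  rcases hg : d.get? m with _ | v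
  · rw [PySem.Dict.getD_of_get?_eq_none (h := hg)]
  · rw [PySem.Dict.getD_of_get?_eq_some (h := hg)]
    exact h _ (PySem.Dict.mem_items_of_get?_eq_some (h := hg))

lemma costA_nonneg (p : Int) (m : String) : 0 ≤ costA p m := by
  unfold costA
  rcases hg : pick2costA.get? p with _ | dd
  · simp
  · simp only [Option.getD_some]
    have hmem := PySem.Dict.mem_items_of_get?_eq_some (h := hg)
    have hit : pick2costA.items =
      [(0, PySem.Dict.ofList [("diamond", 1), ("iron", 1), ("stone", 1)]),
       (1, PySem.Dict.ofList [("diamond", 5), ("iron", 1), ("stone", 1)]),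
       (2, PySem.Dict.ofList [("diamond", 25), ("iron", 5), ("stone", 1)])] := by decide
    rw [hit] at hmem
    simp only [List.mem_cons, List.not_mem_nil, or_false, Prod.mk.injEq] at hmem
    rcases hmem with ⟨_, rfl⟩ | ⟨_, rfl⟩ | ⟨_, rfl⟩ <;>
      exact dict_getD_nonneg _ _ (by decide)

lemma costA_pos (p : Int) (m : String)
    (hp : p = 0 ∨ p = 1 ∨ p = 2)
    (hm : m ∈ (["diamond", "iron", "stone"] : List String)) : 1 ≤ costA p m := by
  simp only [List.mem_cons, List.not_mem_nil, or_false] at hm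
  rcases hp with rfl | rfl | rfl <;> rcases hm with rfl | rfl | rfl <;> decide

-- the inner 5-step scan of A, as a sum over the index range it reads
lemma innerA_sum (minerals : List String) (p : Int) :
    ∀ (fuel : Nat) (idx cost : Int),
      digInnerA minerals (minerals.length : Int) p fuel idx cost
        = cost + ((PySem.List.pyRange idx (min (idx + (fuel : Int)) (minerals.length : Int)) 1).map
            (fun j => costA p (PySem.List.pyGetD minerals j ""))).sum
  | 0, idx, cost => by
      rw [PySem.List.pyRange_one_eq_nil (by omega)]
      simp [digInnerA]
  | fuel + 1, idx, cost => by
      rw [digInnerA]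
      by_cases hn : idx ≥ (minerals.length : Int)
      · rw [if_pos hn, PySem.List.pyRange_one_eq_nil (by omega)]
        simp
      · rw [if_neg hn]
        have hmin : min (idx + (((fuel : Nat) + 1 : Nat) : Int)) (minerals.length : Int)
             = min ((idx + 1) + (fuel : Int)) (minerals.length : Int) := by push_cast; omega
        rw [hmin, PySem.List.pyRange_one_cons (by omega), List.map_cons, List.sum_cons]
        rw [innerA_sum minerals p fuel (idx + 1) _]
        unfold costA
        ring

lemma SB_eq_range (minerals : List String) (pm : PySem.Dict Int Int) :
    SB minerals pm
      = ((PySem.List.pyRange 0 (minerals.length : Int)).map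
          (fun j => elemCostB pm j (PySem.List.pyGetD minerals j ""))).sum := by
  unfold SB
  rw [PySem.List.enumerate_eq_map_pyRange minerals "", List.map_map]
  rfl

lemma floordiv_nonneg_of_nonneg (j : Int) (hj : 0 ≤ j) : 0 ≤ PySem.Int.floordiv j 5 := by
  rw [PySem.Int.floordiv_eq_ediv_of_pos (by omega)]
  exact Int.ediv_nonneg hj (by omega)

lemma SB_empty (minerals : List String) : SB minerals PySem.Dict.empty = 0 := by
  rw [SB_eq_range]
  apply List.sum_eq_zero
  intro x hx
  rcases List.mem_map.1 hx with ⟨j, _, rfl⟩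
  simp [elemCostB, PySem.Dict.get?_empty]

lemma SB_insert_neg (minerals : List String) (d : PySem.Dict Int Int) (k p : Int)
    (hk : k < 0) : SB minerals (d.insert k p) = SB minerals d := by
  rw [SB_eq_range, SB_eq_range]
  congr 1
  apply List.map_congr_left
  intro j hj
  rcases PySem.List.mem_pyRange_one.1 hj with ⟨h0, _⟩
  have := floordiv_nonneg_of_nonneg j h0
  unfold elemCostB
  rw [PySem.Dict.get?_insert]
  rw [if_neg (by omega)]

lemma SB_insert_nonneg (minerals : List String) (d : PySem.Dict Int Int) (k p : Int)
    (hk : 0 ≤ k) (hkd : d.get? k = none) :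
    SB minerals (d.insert k p) = SB minerals d + chunkA minerals k p := by
  rw [SB_eq_range, SB_eq_range]
  have hpt : ∀ j ∈ PySem.List.pyRange 0 (minerals.length : Int),
      elemCostB (d.insert k p) j (PySem.List.pyGetD minerals j "")
        = elemCostB d j (PySem.List.pyGetD minerals j "")
          + (if PySem.Int.floordiv j 5 = k then costA p (PySem.List.pyGetD minerals j "") else 0) := by
    intro j hj
    unfold elemCostB
    rw [PySem.Dict.get?_insert]
    by_cases hjk : PySem.Int.floordiv j 5 = k
    · rw [if_pos hjk, if_pos hjk, hjk, hkd]
      unfold costA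
      rw [tables_eq]
      ring
    · rw [if_neg hjk, if_neg hjk]
      ring
  rw [List.map_congr_left hpt, PySem.List.sum_map_add_int]
  congr 1
  set n : Int := (minerals.length : Int) with hn
  have hn0 : 0 ≤ n := by positivity
  have hsplit : PySem.List.pyRange 0 n
      = (PySem.List.pyRange 0 (min (k*5) n) ++ PySem.List.pyRange (min (k*5) n) (min (k*5+5) n))
        ++ PySem.List.pyRange (min (k*5+5) n) n := by
    rw [← PySem.List.pyRange_one_append _ _ _ (by omega) (by omega),
        ← PySem.List.pyRange_one_append _ _ _ (by omega) (by omega)]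
  rw [hsplit, List.map_append, List.map_append, List.sum_append, List.sum_append]
  have hleft : ((PySem.List.pyRange 0 (min (k*5) n)).map
      (fun j => if PySem.Int.floordiv j 5 = k then costA p (PySem.List.pyGetD minerals j "") else 0)).sum = 0 := by
    apply List.sum_eq_zero
    intro x hx
    rcases List.mem_map.1 hx with ⟨j, hj, rfl⟩
    rcases PySem.List.mem_pyRange_one.1 hj with ⟨h0, hlt⟩
    rw [if_neg]
    intro hdv
    rcases (PySem.Int.floordiv_eq_iff_of_pos (by omega)).1 hdv with ⟨hge, _⟩
    omega
  have hright : ((PySem.List.pyRange (min (k*5+5) n) n).map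
      (fun j => if PySem.Int.floordiv j 5 = k then costA p (PySem.List.pyGetD minerals j "") else 0)).sum = 0 := by
    apply List.sum_eq_zero
    intro x hx
    rcases List.mem_map.1 hx with ⟨j, hj, rfl⟩
    rcases PySem.List.mem_pyRange_one.1 hj with ⟨hge, hlt⟩
    rw [if_neg]
    intro hdv
    rcases (PySem.Int.floordiv_eq_iff_of_pos (by omega)).1 hdv with ⟨_, hlt2⟩
    omega
  rw [hleft, hright]
  have hmid : ((PySem.List.pyRange (min (k*5) n) (min (k*5+5) n)).map
      (fun j => if PySem.Int.floordiv j 5 = k then costA p (PySem.List.pyGetD minerals j "") else 0)).sum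
      = chunkA minerals k p := by
    by_cases h5 : k * 5 ≤ n
    · rw [min_eq_left h5]
      unfold chunkA
      rw [← hn]
      congr 1
      apply List.map_congr_left
      intro j hj
      rcases PySem.List.mem_pyRange_one.1 hj with ⟨hge, hlt⟩
      rw [if_pos ((PySem.Int.floordiv_eq_iff_of_pos (by omega)).2 (by constructor <;> omega))]
    · rw [min_eq_right (by omega), min_eq_right (by omega)]
      rw [PySem.List.pyRange_one_eq_nil (by omega)]
      unfold chunkA
      rw [← hn, PySem.List.pyRange_one_eq_nil (by omega)]
      simp
  rw [hmid]
  ring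

-- main invariant: A's outer loop = accumulator + (B's sum gained by the new map entries)
--                 + the wrap-around contributions of the negative parts
lemma outer_sum (minerals : List String) :
    ∀ (l : List (Int × Int)) (d : PySem.Dict Int Int) (cost : Int),
      (∀ pk ∈ l.takeWhile (fun pk => pk.2 ≠ -1), d.get? pk.1 = none) →
      ((l.takeWhile (fun pk => pk.2 ≠ -1)).map Prod.fst).Nodup →
      digOuterA minerals (minerals.length : Int) l cost
        = cost + (SB minerals (pmOfB l d) - SB minerals d) + negSum minerals l
  | [], d, cost, _, _ => by
      simp [digOuterA, pmOfB, negSum]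
  | (k, p) :: rest, d, cost, hdisj, hnd => by
      rw [digOuterA, pmOfB]
      by_cases hp : p = -1
      · rw [if_pos hp, if_pos hp]
        have htw : List.takeWhile (fun pk => pk.2 ≠ -1) ((k, p) :: rest) = [] := by
          simp [hp, List.takeWhile]
        unfold negSum
        rw [htw]
        simp
      · rw [if_neg hp, if_neg hp]
        have htw : List.takeWhile (fun pk => pk.2 ≠ -1) ((k, p) :: rest)
            = (k, p) :: List.takeWhile (fun pk => pk.2 ≠ -1) rest := by
          simp [hp, List.takeWhile]
        rw [htw] at hdisj hnd
        have hkd : d.get? k = none := hdisj (k, p) (List.mem_cons_self ..)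
        have hnd2 : (k :: (rest.takeWhile (fun pk => pk.2 ≠ -1)).map Prod.fst).Nodup := by
          simpa using hnd
        have hknot : k ∉ (rest.takeWhile (fun pk => pk.2 ≠ -1)).map Prod.fst :=
          (List.nodup_cons.1 hnd2).1
        have hdisj' : ∀ pk ∈ rest.takeWhile (fun pk => pk.2 ≠ -1),
            (d.insert k p).get? pk.1 = none := by
          intro pk hpk
          rw [PySem.Dict.get?_insert,
              if_neg (fun he => hknot (List.mem_map.2 ⟨pk, hpk, he⟩))]
          exact hdisj pk (List.mem_cons_of_mem _ hpk)
        have hnd' : ((rest.takeWhile (fun pk => pk.2 ≠ -1)).map Prod.fst).Nodup :=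
          (List.nodup_cons.1 hnd2).2
        have hinner : digInnerA minerals (minerals.length : Int) p 5 (k * 5) cost
            = cost + chunkA minerals k p := by
          rw [innerA_sum minerals p 5 (k * 5) cost]
          unfold chunkA
          norm_num
        rw [hinner, outer_sum minerals rest (d.insert k p) _ hdisj' hnd']
        have hns : negSum minerals ((k, p) :: rest)
            = (if k < 0 then chunkA minerals k p else 0) + negSum minerals rest := by
          unfold negSum
          rw [htw]
          by_cases hk : k < 0
          · rw [if_pos hk]
            rw [List.filter_cons_of_pos (by simpa using hk)]
            simp
          · rw [if_neg hk]
            rw [List.filter_cons_of_neg (by simpa using hk)]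
            simp
        rw [hns]
        by_cases hk : k < 0
        · rw [SB_insert_neg minerals d k p hk, if_pos hk]
          ring
        · rw [SB_insert_nonneg minerals d k p (by omega) hkd, if_neg hk]
          ring

-- under Pre_ and ¬D_, no processed part has a negative index, so negSum vanishes
lemma negSum_eq_zero (part2pick : List (Int × Int)) (minerals : List String)
    (hpre : Pre_dig_mine part2pick minerals) (hnD : ¬ D_dig_mine part2pick minerals) :
    negSum minerals part2pick = 0 := by
  unfold negSum
  apply List.sum_eq_zero
  intro x hx
  rcases List.mem_map.1 hx with ⟨pk, hpk, rfl⟩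
  rcases List.mem_filter.1 hpk with ⟨hmem, hneg⟩
  exfalso
  have hneg' : pk.1 < 0 := by simpa using hneg
  rcases hpre.2 pk hmem with hbig | ⟨hge, _⟩
  · have : (0 : Int) ≤ (minerals.length : Int) := by positivity
    omega
  · exact hnD ⟨pk, hmem, hneg', hge⟩

lemma nodup_proc (part2pick : List (Int × Int))
    (h : (part2pick.map Prod.fst).Nodup) :
    ((part2pick.takeWhile (fun pk => pk.2 ≠ -1)).map Prod.fst).Nodup :=
  h.sublist ((List.takeWhile_sublist _).map _)

lemma alt_eq_SB (part2pick : List (Int × Int)) (minerals : List String) :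
    dig_mine_alt part2pick minerals
      = SB minerals (pmOfB part2pick PySem.Dict.empty) := by
  show (PySem.List.enumerate minerals).foldl
      (fun total im => total + elemCostB (pmOfB part2pick PySem.Dict.empty) im.1 im.2) 0
    = SB minerals (pmOfB part2pick PySem.Dict.empty)
  refine (PySem.List.foldl_add (PySem.List.enumerate minerals)
      (fun im : Int × String => elemCostB (pmOfB part2pick PySem.Dict.empty) im.1 im.2) 0).trans ?_
  unfold SB
  ring

lemma dig_mine_decomp (part2pick : List (Int × Int)) (minerals : List String)
    (hnd : (part2pick.map Prod.fst).Nodup) :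
    dig_mine part2pick minerals
      = dig_mine_alt part2pick minerals + negSum minerals part2pick := by
  unfold dig_mine
  rw [outer_sum minerals part2pick PySem.Dict.empty 0
        (fun pk _ => PySem.Dict.get?_empty pk.1) (nodup_proc _ hnd)]
  rw [SB_empty, alt_eq_SB]
  ring

-- under Pre_ and D_, the wrap-around contribution is strictly positive
lemma negSum_pos (part2pick : List (Int × Int)) (minerals : List String)
    (hpre : Pre_dig_mine part2pick minerals) (hD : D_dig_mine part2pick minerals) :
    1 ≤ negSum minerals part2pick := by
  rcases hD with ⟨pk, hmem, hneg, hge⟩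
  have hvalid := hpre.2 pk hmem
  have hlen0 : (0 : Int) ≤ (minerals.length : Int) := by positivity
  rcases hvalid with hbig | ⟨_, hpick, hmins⟩
  · omega
  · -- chunkA of this part is ≥ 1
    have hn1 : (1 : Int) ≤ (minerals.length : Int) := by omega
    have hlt : pk.1 * 5 < min (pk.1 * 5 + 5) (minerals.length : Int) := by omega
    have hchunk : 1 ≤ chunkA minerals pk.1 pk.2 := by
      unfold chunkA
      rw [PySem.List.pyRange_one_cons hlt, List.map_cons, List.sum_cons]
      have h0 := hmins 0 (by simp) (by push_cast; omega)
      have hhead : 1 ≤ costA pk.2 (PySem.List.pyGetD minerals (pk.1 * 5) "") := by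
        have := costA_pos pk.2 (PySem.List.pyGetD minerals (pk.1 * 5 + (0:Nat)) "") hpick h0
        simpa using this
      have htail : 0 ≤ ((PySem.List.pyRange (pk.1 * 5 + 1) (min (pk.1 * 5 + 5) (minerals.length : Int)) 1).map
          (fun j => costA pk.2 (PySem.List.pyGetD minerals j ""))).sum := by
        apply List.sum_nonneg
        intro x hx
        rcases List.mem_map.1 hx with ⟨j, _, rfl⟩
        exact costA_nonneg _ _
      have : (0:Nat) < 5 := by omega
      calc (1:Int) ≤ costA pk.2 (PySem.List.pyGetD minerals (pk.1 * 5) "") := hhead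
        _ ≤ _ := by omega
    -- the term belongs to the negSum list, and every term is ≥ 0
    have hmemf : pk ∈ (part2pick.takeWhile (fun pk => pk.2 ≠ -1)).filter (fun pk => pk.1 < 0) :=
      List.mem_filter.2 ⟨hmem, by simpa using hneg⟩
    have hterm : chunkA minerals pk.1 pk.2
        ∈ ((part2pick.takeWhile (fun pk => pk.2 ≠ -1)).filter (fun pk => pk.1 < 0)).map
            (fun pk => chunkA minerals pk.1 pk.2) := List.mem_map_of_mem hmemf
    have hall : ∀ x ∈ ((part2pick.takeWhile (fun pk => pk.2 ≠ -1)).filter (fun pk => pk.1 < 0)).map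
        (fun pk => chunkA minerals pk.1 pk.2), 0 ≤ x := by
      intro x hx
      rcases List.mem_map.1 hx with ⟨q, hq, rfl⟩
      apply List.sum_nonneg
      intro y hy
      rcases List.mem_map.1 hy with ⟨j, _, rfl⟩
      exact costA_nonneg _ _
    have := List.single_le_sum hall _ hterm
    unfold negSum
    omega

-- ===== VERDICT (by name: the statement is the Claim_ definition above) =====
theorem dig_mine_spec : Claim_unchanged_dig_mine := by
  intro part2pick minerals _ hpre hnD
  rw [dig_mine_decomp part2pick minerals hpre.1,
      negSum_eq_zero part2pick minerals hpre hnD]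
  ring

theorem dig_mine_changed : Claim_changed_dig_mine := by
  unfold Claim_changed_dig_mine; decide

theorem dig_mine_tight : Claim_exact_dig_mine := by
  intro part2pick minerals _ hpre hD
  rw [dig_mine_decomp part2pick minerals hpre.1]
  have := negSum_pos part2pick minerals hpre hD
  omega
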